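-- pv_equiv track=rewrite | github.com/ATanggara/GBS-PF-sim | GBSPF/util.py | sqbs_arr
-- ===== SOURCE A (Python) =====
-- def sqbs_arr(m):
--     """
--     return str of Beamsplitter arrangement in "1,4,7,12,14" format
--     """
--     barr = ""
--     for j in range(1,m):
--         bs_arrj = ""
--         if j%2==1:
--             for k in range(1,m,2):
--                 if j!=1 or k!=1:
--                     bs_arrj = bs_arrj + ","
--                 bs_arrj = bs_arrj + str(k)
--         else:
--             for k in range(2,m-1,2):
--                 if j!=1:
--                     bs_arrj = bs_arrj + ","
--                 bs_arrj = bs_arrj + str(k)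
--         barr = barr + bs_arrj
--     return barr
-- ===== SOURCE B (Python) =====
-- def sqbs_arr(m):
--     """
--     return str of Beamsplitter arrangement in "1,4,7,12,14" format
--     """
--     odd = ",".join(str(k) for k in range(1, m, 2))
--     even = ",".join(str(k) for k in range(2, m - 1, 2))
--     blocks = [odd if j % 2 == 1 else even for j in range(1, m)]
--     return ",".join(b for b in blocks if b)
-- ===== Notes on version B (the rewrite author's own statement) =====
-- stated objective: simpler
-- what changed: B precomputes the odd and even blocks once as joined strings and emits one of them per j with a single empty-block-skipping ','.join, replacing A's doubly-nested loops with per-element first-comma bookkeeping.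
import Mathlib
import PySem

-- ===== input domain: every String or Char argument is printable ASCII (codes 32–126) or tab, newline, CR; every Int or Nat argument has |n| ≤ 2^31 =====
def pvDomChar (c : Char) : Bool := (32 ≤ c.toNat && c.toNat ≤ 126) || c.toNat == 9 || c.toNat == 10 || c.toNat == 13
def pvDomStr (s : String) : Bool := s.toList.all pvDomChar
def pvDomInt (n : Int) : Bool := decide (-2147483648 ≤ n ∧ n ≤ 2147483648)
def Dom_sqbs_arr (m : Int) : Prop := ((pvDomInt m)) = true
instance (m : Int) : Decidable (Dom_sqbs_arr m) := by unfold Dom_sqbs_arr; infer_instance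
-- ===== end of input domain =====

-- B builds the two beamsplitter blocks once and joins the per-j nonempty blocks with a single
-- ','-join, instead of A's doubly-nested loops with per-element first-comma bookkeeping (objective: simpler).

-- ===== PORT A =====
def sqbs_arr (m : Int) : String :=
  String.ofList <|
    (PySem.List.pyRange 1 m 1).foldl
      (fun barr j =>
        barr ++
          (if PySem.Int.mod j 2 == 1 then
            (PySem.List.pyRange 1 m 2).foldl
              (fun bs k => (if j ≠ 1 ∨ k ≠ 1 then bs ++ [','] else bs) ++ PySem.Int.toChars k) []
          else
            (PySem.List.pyRange 2 (m - 1) 2).foldl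
              (fun bs k => (if j ≠ 1 then bs ++ [','] else bs) ++ PySem.Int.toChars k) []))
      []

-- ===== PORT B =====
def sqbs_arr_alt (m : Int) : String :=
  let odd := PySem.Chars.join [','] ((PySem.List.pyRange 1 m 2).map PySem.Int.toChars)
  let even := PySem.Chars.join [','] ((PySem.List.pyRange 2 (m - 1) 2).map PySem.Int.toChars)
  let blocks := (PySem.List.pyRange 1 m 1).map
    (fun j => if PySem.Int.mod j 2 == 1 then odd else even)
  String.ofList (PySem.Chars.join [','] (blocks.filter (fun b => b ≠ [])))

-- ===== PRECONDITION & SPEC =====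
def Spec_sqbs_arr (m : Int) (out : String) : Prop := out = sqbs_arr_alt m
instance (m : Int) (out : String) : Decidable (Spec_sqbs_arr m out) := by unfold Spec_sqbs_arr; infer_instance

-- ===== CLAIM (what is proved, stated in full; the proofs are below) =====
def Claim_equal_sqbs_arr : Prop := ∀ (m : Int), Dom_sqbs_arr m → Spec_sqbs_arr m (sqbs_arr m)

-- ===== LEMMAS AND PROOFS =====

/-- `,x1,x2,...` : every element preceded by a comma. -/
def pvPref (ks : List Int) : List Char := ks.flatMap (fun k => [','] ++ PySem.Int.toChars k)

theorem pvPref_cons (k : Int) (ks : List Int) :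
    pvPref (k :: ks) = [','] ++ PySem.Int.toChars k ++ pvPref ks := by
  simp [pvPref]

theorem pvFlatMap_congr {α β : Type} (l : List α) (f g : α → List β)
    (h : ∀ x ∈ l, f x = g x) : l.flatMap f = l.flatMap g := by
  induction l with
  | nil => rfl
  | cons x xs ih =>
    simp only [List.flatMap_cons]
    rw [h x (by simp), ih (fun y hy => h y (by simp [hy]))]

theorem pvJoin_cons (sep x : List Char) (xs : List (List Char)) :
    PySem.Chars.join sep (x :: xs) = x ++ xs.flatMap (fun y => sep ++ y) := by
  induction xs generalizing x with
  | nil => simp [PySem.Chars.join_singleton]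
  | cons y ys ih =>
    rw [PySem.Chars.join_cons_cons, ih y]
    simp

theorem pvJoin_filter (L : List (List Char)) (x : List Char) (hx : x ≠ []) :
    PySem.Chars.join [','] ((x :: L).filter (fun b => b ≠ [])) =
      x ++ L.flatMap (fun y => if y = [] then [] else ',' :: y) := by
  induction L generalizing x with
  | nil => simp [hx, PySem.Chars.join_singleton]
  | cons y ys ih =>
    by_cases hy : y = []
    · subst hy
      have h1 : ((x :: ([] : List Char) :: ys).filter (fun b => b ≠ [])) =
          ((x :: ys).filter (fun b => b ≠ [])) := by
        simp [hx]
      rw [h1, ih x hx]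
      simp
    · have h1 : ((x :: y :: ys).filter (fun b => b ≠ [])) =
          x :: ((y :: ys).filter (fun b => b ≠ [])) := by
        simp [hx]
      have h2 : ((y :: ys).filter (fun b => b ≠ [])) = y :: (ys.filter (fun b => b ≠ [])) := by
        simp [hy]
      rw [h1, h2, PySem.Chars.join_cons_cons, ← h2, ih y hy]
      simp [hy]

theorem pvRange_two_cons (a b : Int) (h : a < b) :
    PySem.List.pyRange a b 2 = a :: PySem.List.pyRange (a + 2) b 2 := by
  rw [PySem.List.pyRange_of_pos a b (by norm_num : (0:Int) < 2),
      PySem.List.pyRange_of_pos (a + 2) b (by norm_num : (0:Int) < 2)]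
  by_cases h2 : a + 2 < b
  · rw [if_pos h, if_pos h2]
    have hn : ((b - a + 2 - 1) / 2).toNat = ((b - (a + 2) + 2 - 1) / 2).toNat + 1 := by omega
    rw [hn, List.range_succ_eq_map]
    simp only [List.map_cons, List.map_map, Nat.cast_zero, mul_zero, add_zero, List.cons.injEq]
    refine ⟨trivial, List.map_congr_left ?_⟩
    intro k _
    simp only [Function.comp_apply]
    push_cast
    ring
  · rw [if_pos h, if_neg h2]
    have hn : ((b - a + 2 - 1) / 2).toNat = 1 := by omega
    rw [hn]
    simp [List.range_succ]

theorem pvRange_two_nil (a b : Int) (h : b ≤ a) : PySem.List.pyRange a b 2 = [] := by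
  rw [PySem.List.pyRange_of_pos a b (by norm_num : (0:Int) < 2), if_neg (by omega)]
  simp

theorem pvMain (m : Int) : sqbs_arr m = sqbs_arr_alt m := by
  unfold sqbs_arr sqbs_arr_alt
  by_cases hm1 : m ≤ 1
  · rw [PySem.List.pyRange_one_eq_nil hm1]
    simp [PySem.Chars.join_nil]
  · have hm : (1 : Int) < m := by omega
    have hO : PySem.List.pyRange 1 m 2 = 1 :: PySem.List.pyRange 3 m 2 := pvRange_two_cons 1 m hm
    have hjs : PySem.List.pyRange 1 m 1 = 1 :: PySem.List.pyRange 2 m 1 :=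
      PySem.List.pyRange_one_cons hm
    have hO'ne : ∀ k ∈ PySem.List.pyRange 3 m 2, k ≠ 1 := by
      intro k hk
      have := (PySem.List.mem_pyRange_iff_of_pos (by norm_num : (0:Int) < 2) k).mp hk
      omega
    have hRge : ∀ j ∈ PySem.List.pyRange 2 m 1, j ≠ 1 := by
      intro j hj
      have := (PySem.List.mem_pyRange_one).mp hj
      omega
    have htoc1 : PySem.Int.toChars 1 = ['1'] := by decide
    have htoc2 : PySem.Int.toChars 2 = ['2'] := by decide
    -- the odd block, as B computes it
    have hoddB : PySem.Chars.join [','] ((PySem.List.pyRange 1 m 2).map PySem.Int.toChars) =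
        PySem.Int.toChars 1 ++ pvPref (PySem.List.pyRange 3 m 2) := by
      rw [hO, List.map_cons, pvJoin_cons]
      simp [pvPref, List.flatMap_map]
    have hoddne : PySem.Chars.join [','] ((PySem.List.pyRange 1 m 2).map PySem.Int.toChars) ≠ [] := by
      rw [hoddB, htoc1]; simp
    -- the even block, as B computes it, vs pvPref of the even range
    have hevenB :
        (if PySem.Chars.join [','] ((PySem.List.pyRange 2 (m - 1) 2).map PySem.Int.toChars) = []
          then []
          else ',' :: PySem.Chars.join [','] ((PySem.List.pyRange 2 (m - 1) 2).map PySem.Int.toChars)) =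
          pvPref (PySem.List.pyRange 2 (m - 1) 2) := by
      by_cases hE : m - 1 ≤ 2
      · rw [pvRange_two_nil 2 (m - 1) hE]
        simp [PySem.Chars.join_nil, pvPref]
      · rw [pvRange_two_cons 2 (m - 1) (by omega), List.map_cons, pvJoin_cons]
        have hne : (PySem.Int.toChars 2 ++
            (List.map PySem.Int.toChars (PySem.List.pyRange (2 + 2) (m - 1) 2)).flatMap
              (fun y => [','] ++ y)) ≠ [] := by
          rw [htoc2]; simp
        rw [if_neg hne, pvPref_cons]
        simp [pvPref, List.flatMap_map]
    -- A's first (j = 1) block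
    have hfirst :
        (PySem.List.pyRange 1 m 2).foldl
          (fun bs k => (if (1:Int) ≠ 1 ∨ k ≠ 1 then bs ++ [','] else bs) ++ PySem.Int.toChars k)
          [] =
        PySem.Int.toChars 1 ++ pvPref (PySem.List.pyRange 3 m 2) := by
      rw [hO, List.foldl_cons]
      have h0 : ((if (1:Int) ≠ 1 ∨ (1:Int) ≠ 1 then ([] : List Char) ++ [','] else []) ++
          PySem.Int.toChars 1) = PySem.Int.toChars 1 := by simp
      rw [h0,
        PySem.List.foldl_congr_mem (PySem.List.pyRange 3 m 2) _
          (fun bs k => bs ++ ([','] ++ PySem.Int.toChars k)) (PySem.Int.toChars 1)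
          (by
            intro acc x hx
            simp [hO'ne x hx]),
        PySem.List.foldl_append_eq_flatMap]
      rfl
    -- A's block for any j ≠ 1
    have hblockA : ∀ (acc : List Char), ∀ j ∈ PySem.List.pyRange 2 m 1,
        (fun (barr : List Char) (j : Int) =>
          barr ++
            (if PySem.Int.mod j 2 == 1 then
              (PySem.List.pyRange 1 m 2).foldl
                (fun bs k => (if j ≠ 1 ∨ k ≠ 1 then bs ++ [','] else bs) ++ PySem.Int.toChars k) []
            else
              (PySem.List.pyRange 2 (m - 1) 2).foldl
                (fun bs k => (if j ≠ 1 then bs ++ [','] else bs) ++ PySem.Int.toChars k) [])) acc j =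
        acc ++
          (if PySem.Int.mod j 2 == 1 then pvPref (PySem.List.pyRange 1 m 2)
           else pvPref (PySem.List.pyRange 2 (m - 1) 2)) := by
      intro acc j hj
      have hj1 : j ≠ 1 := hRge j hj
      by_cases hc : PySem.Int.mod j 2 == 1
      · simp only [hc, if_true]
        rw [PySem.List.foldl_congr_mem (PySem.List.pyRange 1 m 2) _
              (fun bs k => bs ++ ([','] ++ PySem.Int.toChars k)) []
              (by intro a x _; simp [hj1]),
            PySem.List.foldl_append_eq_flatMap]
        rfl
      · simp only [hc, if_false, Bool.false_eq_true]
        rw [PySem.List.foldl_congr_mem (PySem.List.pyRange 2 (m - 1) 2) _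
              (fun bs k => bs ++ ([','] ++ PySem.Int.toChars k)) []
              (by intro a x _; simp [hj1]),
            PySem.List.foldl_append_eq_flatMap]
        rfl
    -- assemble
    apply congrArg String.ofList
    rw [hjs, List.foldl_cons, List.map_cons]
    have hmod1 : (PySem.Int.mod 1 2 == 1) = true := by decide
    simp only [hmod1, if_true]
    rw [List.nil_append, hfirst]
    rw [PySem.List.foldl_congr_mem _ _ _ _ hblockA, PySem.List.foldl_append_eq_flatMap]
    rw [pvJoin_filter _ _ hoddne, hoddB]
    rw [List.flatMap_map]
    rw [List.append_assoc]
    apply congrArg (fun t => PySem.Int.toChars 1 ++ t)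
    apply congrArg (fun t => pvPref (PySem.List.pyRange 3 m 2) ++ t)
    apply pvFlatMap_congr
    intro j hj
    by_cases hc : PySem.Int.mod j 2 == 1
    · simp only [hc, if_true]
      rw [hO, pvPref_cons]
      have hne' : PySem.Int.toChars 1 ++ pvPref (PySem.List.pyRange 3 m 2) ≠ [] := by
        rw [htoc1]; simp
      rw [if_neg hne']
      simp
    · simp only [hc, if_false, Bool.false_eq_true]
      exact hevenB.symm

-- ===== VERDICT (by name: the statement is the Claim_ definition above) =====
theorem sqbs_arr_spec : Claim_equal_sqbs_arr := by
  intro m _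
  unfold Spec_sqbs_arr
  exact pvMain m
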